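-- pv_equiv track=rewrite | github.com/AlavudeenA/structured-data-search-engine | src/capsule_builder.py | detect_entities
-- ===== SOURCE A (Python) =====
-- from typing import Any
--
-- def detect_entities(rows: list[dict[str, Any]], columns: list[str]) -> dict[str, list[str]]:
--     """Detect entity-like categorical columns without domain keywords."""
--     entity_values: dict[str, list[str]] = {}
--
--     for col in columns:
--         values = [
--             str(r.get(col)).strip()
--             for r in rows
--             if r.get(col) not in (None, "")
--         ]
--
--         if not values:
--             continue
--
--         unique_vals = sorted(set(values))
--         unique_count = len(unique_vals)
--
--         if 1 < unique_count <= 20: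
--             entity_values[col] = unique_vals[:5]
--         elif col.lower().endswith(("id", "_id")) and unique_count <= 50:
--             entity_values[col] = unique_vals[:5]
--
--     return entity_values
-- ===== SOURCE B (Python) =====
-- from typing import Any
--
-- def detect_entities(rows: list[dict[str, Any]], columns: list[str]) -> dict[str, list[str]]:
--     """Detect entity-like categorical columns without domain keywords."""
--     # Different algorithm: no set is built. All kept values are sorted WITH
--     # duplicates, then one adjacent-dedup scan simultaneously counts the
--     # distinct values and collects the first five; a single arithmetic cap
--     # replaces the if/elif threshold pair.
--     out: dict[str, list[str]] = {}
--     for col in columns: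
--         vals = sorted(str(r.get(col)).strip() for r in rows if r.get(col) not in (None, ""))
--         n = 0
--         top5: list[str] = []
--         prev = None
--         for v in vals:
--             if n == 0 or v != prev:
--                 n += 1
--                 prev = v
--                 if len(top5) < 5:
--                     top5.append(v)
--         if n == 0:
--             continue
--         cap = 20 if n > 1 else 0
--         if col.lower().endswith(("id", "_id")):
--             cap = max(cap, 50)
--         if n <= cap:
--             out[col] = top5
--     return out
-- ===== Notes on version B (the rewrite author's own statement) =====
-- stated objective: alternative
-- what changed: B builds no set at all: per column it sorts ALL kept values with duplicates, then a single adjacent-dedup scan simultaneously counts the distinct values and collects the first five (no uniq list, no [:5] slice), and a single arithmetic cap (20/50 via max) replaces A's if/elif threshold pair.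
import Mathlib
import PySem

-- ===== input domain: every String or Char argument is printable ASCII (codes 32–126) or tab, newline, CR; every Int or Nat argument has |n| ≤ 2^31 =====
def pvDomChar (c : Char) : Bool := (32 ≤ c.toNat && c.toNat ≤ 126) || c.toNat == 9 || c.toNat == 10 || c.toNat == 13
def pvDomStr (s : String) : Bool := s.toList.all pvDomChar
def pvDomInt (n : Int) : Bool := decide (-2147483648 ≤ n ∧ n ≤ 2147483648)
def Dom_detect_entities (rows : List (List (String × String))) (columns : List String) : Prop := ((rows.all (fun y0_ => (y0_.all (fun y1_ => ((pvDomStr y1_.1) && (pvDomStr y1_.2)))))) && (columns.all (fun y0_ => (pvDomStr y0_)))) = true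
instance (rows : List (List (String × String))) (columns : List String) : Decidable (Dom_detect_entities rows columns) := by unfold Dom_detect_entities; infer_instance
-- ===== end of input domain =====

-- B builds no set: it sorts all kept values with duplicates, one adjacent-dedup scan counts distinct values and collects the first five, and an arithmetic cap replaces the if/elif pair (alternative decomposition; same results).

-- ===== PORT A =====
-- the per-column filter/strip comprehension (identical text in both Pythons)
def avValues (rows : List (List (String × String))) (col : String) : List String :=
  rows.filterMap (fun r =>
    match (PySem.Dict.mk r).get? col with
    | none => none
    | some v => if v = "" then none else some (PySem.Str.strip v))

def detect_entities (rows : List (List (String × String))) (columns : List String) : List (String × List String) :=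
  (columns.foldl (fun d col =>
    let values := avValues rows col
    if values = [] then d
    else
      let unique_vals := PySem.List.sorted (PySem.Set.ofList values) (fun x => x) false
      let unique_count := unique_vals.length
      if 1 < unique_count ∧ unique_count ≤ 20 then
        d.insert col (unique_vals.take 5)
      else if (PySem.Str.endswith (PySem.Str.lower col) "id" || PySem.Str.endswith (PySem.Str.lower col) "_id") = true ∧ unique_count ≤ 50 then
        d.insert col (unique_vals.take 5)
      else d) PySem.Dict.empty).items

-- ===== PORT B =====
-- one step of B's scan loop over the sorted values: state (n, top5, prev)
def bStep (st : Int × List String × Option String) (v : String) : Int × List String × Option String :=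
  if st.1 = 0 ∨ some v ≠ st.2.2 then
    (st.1 + 1, if st.2.1.length < 5 then st.2.1 ++ [v] else st.2.1, some v)
  else st

def detect_entities_alt (rows : List (List (String × String))) (columns : List String) : List (String × List String) :=
  (columns.foldl (fun d col =>
    let vals := PySem.List.sorted (avValues rows col) (fun x => x) false
    let st := vals.foldl bStep ((0 : Int), ([] : List String), (none : Option String))
    let n := st.1
    let top5 := st.2.1
    if n = 0 then d
    else
      let cap : Int := if 1 < n then 20 else 0
      let cap := if (PySem.Str.endswith (PySem.Str.lower col) "id" || PySem.Str.endswith (PySem.Str.lower col) "_id") = true then max cap 50 else cap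
      if n ≤ cap then d.insert col top5 else d) PySem.Dict.empty).items

-- ===== PRECONDITION & SPEC =====
def Spec_detect_entities (rows : List (List (String × String))) (columns : List String) (out : List (String × List String)) : Prop := out = detect_entities_alt rows columns
instance (rows : List (List (String × String))) (columns : List String) (out : List (String × List String)) : Decidable (Spec_detect_entities rows columns out) := by unfold Spec_detect_entities; infer_instance

-- ===== CLAIM =====
def Claim_equal_detect_entities : Prop := ∀ (rows : List (List (String × String))) (columns : List String), Dom_detect_entities rows columns → Spec_detect_entities rows columns (detect_entities rows columns)

-- ===== LEMMAS AND PROOFS =====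

-- the adjacent-dedup scan B's loop performs, as a recursive function
def sdScan : Option String → List String → List String
  | _, [] => []
  | prev, v :: vs => if some v = prev then sdScan prev vs else v :: sdScan (some v) vs

-- B's fold computes the length, the first five elements and the last element of sdScan
theorem foldl_bStep (vs : List String) :
    ∀ (k : Int) (t : List String) (prev : Option String),
      0 ≤ k → (k = 0 ↔ prev = none) → t.length ≤ 5 →
      vs.foldl bStep (k, t, prev) =
        (k + (sdScan prev vs).length, (t ++ sdScan prev vs).take 5, vs.getLast?.or prev) := by
  induction vs with
  | nil =>
    intro k t prev hk hiff ht
    simp [sdScan, List.take_of_length_le ht]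
  | cons v vs ih =>
    intro k t prev hk hiff ht
    by_cases hvp : some v = prev
    · have hkne : k ≠ 0 := by
        intro h0; rw [hiff] at h0; rw [h0] at hvp; simp at hvp
      have hstep : bStep (k, t, prev) v = (k, t, prev) := by
        simp [bStep, hkne, hvp]
      rw [List.foldl_cons, hstep, ih k t prev hk hiff ht]
      have hlast : (v :: vs).getLast?.or prev = vs.getLast?.or prev := by
        cases vs with
        | nil => simp [← hvp]
        | cons w ws => simp [List.getLast?_cons_cons]
      rw [hlast]
      simp [sdScan, hvp]
    · have hstep : bStep (k, t, prev) v =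
          (k + 1, if t.length < 5 then t ++ [v] else t, some v) := by
        by_cases hk0 : k = 0 <;> simp [bStep, hk0, Ne.symm, hvp]
      rw [List.foldl_cons, hstep,
        ih (k + 1) (if t.length < 5 then t ++ [v] else t) (some v) (by omega)
          (by simp; omega)
          (by split <;> (simp_all; try omega))]
      have hsd : sdScan prev (v :: vs) = v :: sdScan (some v) vs := by
        simp [sdScan, hvp]
      rw [hsd]
      refine Prod.ext ?_ (Prod.ext ?_ ?_)
      · simp; ring
      · simp only
        by_cases htl : t.length < 5
        · simp [htl]
        · have h5 : 5 ≤ t.length := by omega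
          simp [htl, List.take_append_of_le_length h5, List.take_of_length_le ht]
      · simp only
        cases vs with
        | nil => simp
        | cons w ws =>
          rw [List.getLast?_cons_cons]
          cases h : (w :: ws).getLast? with
          | none => simp [List.getLast?_eq_none_iff] at h
          | some x => simp

theorem mem_sdScan (s : List String) :
    ∀ (prev : Option String), s.Pairwise (· ≤ ·) →
      (∀ p, prev = some p → ∀ y ∈ s, p ≤ y) →
      ∀ x, x ∈ sdScan prev s ↔ x ∈ s ∧ some x ≠ prev := by
  induction s with
  | nil => intro prev _ _ x; simp [sdScan]
  | cons v vs ih =>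
    intro prev hpw hlo x
    have hpwt : vs.Pairwise (· ≤ ·) := hpw.of_cons
    have hvle : ∀ y ∈ vs, v ≤ y := by
      intro y hy; exact List.rel_of_pairwise_cons hpw hy
    by_cases hvp : some v = prev
    · rw [show sdScan prev (v :: vs) = sdScan prev vs from by simp [sdScan, hvp]]
      rw [ih prev hpwt (by intro p hp y hy; rw [hp] at hvp; cases hvp; exact hvle y hy) x]
      constructor
      · rintro ⟨hx, hne⟩
        exact ⟨List.mem_cons_of_mem v hx, hne⟩
      · rintro ⟨hx, hne⟩
        rcases List.mem_cons.mp hx with h | h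
        · exact absurd (h ▸ hvp) hne
        · exact ⟨h, hne⟩
    · rw [show sdScan prev (v :: vs) = v :: sdScan (some v) vs from by simp [sdScan, hvp]]
      rw [List.mem_cons, ih (some v) hpwt (by intro p hp y hy; cases hp; exact hvle y hy) x]
      constructor
      · rintro (h | ⟨hx, hne⟩)
        · exact ⟨h ▸ List.mem_cons_self, h ▸ hvp⟩
        · refine ⟨List.mem_cons_of_mem v hx, ?_⟩
          intro hxp
          rcases prev with _ | p
          · simp at hxp
          · have hp : p = x := by simpa using hxp.symm
            have h1 : p ≤ v := by
              have := hlo p rfl v List.mem_cons_self; exact this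
            have h2 : v ≤ x := hvle x hx
            have : v = x := le_antisymm h2 (hp ▸ h1)
            exact hne (by simp [this])
      · rintro ⟨hx, hne⟩
        rcases List.mem_cons.mp hx with h | h
        · exact Or.inl h
        · by_cases hxv : x = v
          · exact Or.inl hxv
          · exact Or.inr ⟨h, by simpa using hxv⟩

theorem pairwise_sdScan (s : List String) :
    ∀ (prev : Option String), s.Pairwise (· ≤ ·) →
      (∀ p, prev = some p → ∀ y ∈ s, p ≤ y) →
      (sdScan prev s).Pairwise (· < ·) ∧ (∀ p, prev = some p → ∀ z ∈ sdScan prev s, p < z) := by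
  induction s with
  | nil => intro prev _ _; simp [sdScan]
  | cons v vs ih =>
    intro prev hpw hlo
    have hpwt : vs.Pairwise (· ≤ ·) := hpw.of_cons
    have hvle : ∀ y ∈ vs, v ≤ y := by
      intro y hy; exact List.rel_of_pairwise_cons hpw hy
    by_cases hvp : some v = prev
    · rw [show sdScan prev (v :: vs) = sdScan prev vs from by simp [sdScan, hvp]]
      exact ih prev hpwt (by intro p hp y hy; rw [hp] at hvp; cases hvp; exact hvle y hy)
    · rw [show sdScan prev (v :: vs) = v :: sdScan (some v) vs from by simp [sdScan, hvp]]
      obtain ⟨hp1, hp2⟩ := ih (some v) hpwt (by intro p hp y hy; cases hp; exact hvle y hy)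
      have hvlt : ∀ z ∈ sdScan (some v) vs, v < z := hp2 v rfl
      refine ⟨List.pairwise_cons.mpr ⟨hvlt, hp1⟩, ?_⟩
      intro p hp z hz
      cases hp
      have hpv : p < v := by
        have hle : p ≤ v := hlo p rfl v List.mem_cons_self
        have hne : p ≠ v := by intro h; exact hvp (by simp [h])
        exact lt_of_le_of_ne hle hne
      rcases List.mem_cons.mp hz with h | h
      · exact h ▸ hpv
      · exact lt_trans hpv (hvlt z h)

-- the scan over the duplicate-keeping sort equals A's sorted set
theorem sdScan_sorted_eq (values : List String) :
    sdScan none (PySem.List.sorted values (fun x => x) false) =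
      PySem.List.sorted (PySem.Set.ofList values) (fun x => x) false := by
  have hpw : (PySem.List.sorted values (fun x => x) false).Pairwise (· ≤ ·) :=
    PySem.List.sorted_pairwise values (fun x => x)
  have hno : (∀ p, (none : Option String) = some p → ∀ y ∈ PySem.List.sorted values (fun x => x) false, p ≤ y) := by
    intro p hp; cases hp
  have hmem := mem_sdScan _ none hpw hno
  have hlt := (pairwise_sdScan _ none hpw hno).1
  refine (PySem.List.sorted_eq_of_perm_of_pairwise_lt _ _ (fun x => x) ?_ hlt).symm
  refine (List.perm_ext_iff_of_nodup (hlt.imp ne_of_lt) (PySem.Set.nodup_ofList values)).mpr ?_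
  intro a
  rw [hmem a, PySem.Set.mem_ofList, PySem.List.mem_sorted]
  simp

theorem ofList_eq_nil_iff (xs : List String) : PySem.Set.ofList xs = [] ↔ xs = [] := by
  cases xs with
  | nil => simp
  | cons x xs => simp [PySem.Set.ofList_cons]

-- ===== VERDICT =====
theorem detect_entities_spec : Claim_equal_detect_entities := by
  intro rows columns _
  unfold Spec_detect_entities detect_entities detect_entities_alt
  congr 1
  apply PySem.List.foldl_congr_mem
  intro d col _
  have hfold := foldl_bStep (PySem.List.sorted (avValues rows col) (fun x => x) false)
    0 [] none (by omega) (by simp) (by simp)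
  rw [sdScan_sorted_eq (avValues rows col)] at hfold
  simp only [zero_add, List.nil_append] at hfold
  simp only [hfold]
  by_cases hnil : avValues rows col = []
  · simp [hnil]
  · have hne : PySem.List.sorted (PySem.Set.ofList (avValues rows col)) (fun x => x) false ≠ [] := by
      rw [Ne, PySem.List.sorted_eq_nil_iff, ofList_eq_nil_iff]
      exact hnil
    have hL : (PySem.List.sorted (PySem.Set.ofList (avValues rows col)) (fun x => x) false).length ≠ 0 := by
      exact fun h => hne (List.length_eq_zero_iff.mp h)
    simp only [if_neg hnil]
    set L := (PySem.List.sorted (PySem.Set.ofList (avValues rows col)) (fun x => x) false).length with hLdef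
    by_cases hew : (PySem.Str.endswith (PySem.Str.lower col) "id" || PySem.Str.endswith (PySem.Str.lower col) "_id") = true <;>
      by_cases h1 : (1 : Int) < (L : Int) <;>
        simp only [hew, h1, if_true, if_false,
          show max (20 : Int) 50 = 50 from by norm_num,
          show max (0 : Int) 50 = 50 from by norm_num, true_and] <;>
        split_ifs <;> first | rfl | omega | simp_all
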